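-- pv_equiv track=rewrite | github.com/Luk-stud/watch-finder | analyze_colors_detailed.py | analyze_color_context
-- ===== SOURCE A (Python) =====
-- from collections import Counter, defaultdict
--
-- def analyze_color_context(description, colors):
--     """Analyze the context in which colors are mentioned."""
--     contexts = {
--         'dial': ['dial', 'face'],
--         'case': ['case', 'housing', 'body'],
--         'bezel': ['bezel', 'ring'],
--         'hands': ['hands', 'indices', 'markers'],
--         'strap': ['strap', 'bracelet', 'band'],
--         'aesthetic': ['aesthetic', 'design', 'style', 'look', 'appearance']
--     }
--
--     color_contexts = defaultdict(list)
--
--     # For each color found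
--     for color in colors:
--         # Get the sentence containing the color
--         sentences = [s for s in description.lower().split('.') if color in s]
--         for sentence in sentences:
--             # Check each context type
--             found_context = False
--             for context_type, context_words in contexts.items():
--                 if any(word in sentence for word in context_words):
--                     color_contexts[color].append(context_type)
--                     found_context = True
--             if not found_context:
--                 color_contexts[color].append('general')
--
--     return dict(color_contexts)
-- ===== SOURCE B (Python) =====
-- def analyze_color_context(description, colors):
--     """Analyze the context in which colors are mentioned."""
--     contexts = {
--         'dial': ['dial', 'face'],
--         'case': ['case', 'housing', 'body'],
--         'bezel': ['bezel', 'ring'],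
--         'hands': ['hands', 'indices', 'markers'],
--         'strap': ['strap', 'bracelet', 'band'],
--         'aesthetic': ['aesthetic', 'design', 'style', 'look', 'appearance']
--     }
--     # Precompute, once per sentence, the list of context labels it carries.
--     table = []
--     for sentence in description.lower().split('.'):
--         labels = [t for t, words in contexts.items()
--                   if any(w in sentence for w in words)]
--         table.append((sentence, labels if labels else ['general']))
--     # Colors outermost so key insertion order and duplicate handling match.
--     result = {}
--     for color in colors:
--         for sentence, labels in table:
--             if color in sentence:
--                 result.setdefault(color, []).extend(labels)
--     return result
-- ===== Notes on version B (the rewrite author's own statement) =====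
-- stated objective: alternative
-- what changed: B precomputes, once per sentence, the list of context labels that sentence carries (with 'general' as fallback), then for each color simply extends its entry with each matching sentence's precomputed label list, instead of re-scanning the contexts dict with a found-flag for every (color, sentence) pair.
import Mathlib
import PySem

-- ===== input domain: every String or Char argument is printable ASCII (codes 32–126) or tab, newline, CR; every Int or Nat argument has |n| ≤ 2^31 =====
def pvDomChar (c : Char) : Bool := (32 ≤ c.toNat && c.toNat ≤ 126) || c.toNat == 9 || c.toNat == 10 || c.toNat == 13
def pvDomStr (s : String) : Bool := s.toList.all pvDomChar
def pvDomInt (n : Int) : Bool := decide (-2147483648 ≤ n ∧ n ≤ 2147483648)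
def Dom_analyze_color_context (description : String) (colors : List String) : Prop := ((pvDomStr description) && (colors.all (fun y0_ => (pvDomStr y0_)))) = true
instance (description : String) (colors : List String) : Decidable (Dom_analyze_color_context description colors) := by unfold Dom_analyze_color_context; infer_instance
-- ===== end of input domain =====

-- B precomputes each sentence's context labels once, then extends per color; alternative decomposition, return-value equivalence proved.


-- the literal 'contexts' dict of both Pythons, as its insertion-ordered item list (keys distinct)
def pvContexts : List (String × List String) :=
  [("dial", ["dial", "face"]),
   ("case", ["case", "housing", "body"]),
   ("bezel", ["bezel", "ring"]),
   ("hands", ["hands", "indices", "markers"]),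
   ("strap", ["strap", "bracelet", "band"]),
   ("aesthetic", ["aesthetic", "design", "style", "look", "appearance"])]

-- ===== PORT A =====
-- defaultdict(list)[color].append(x) is Dict.modify color [] (· ++ [x]); the contexts loop carries the found flag.
-- s.split('.') has a nonempty separator, so Str.split? always returns some; .getD [] unwraps it.
def analyze_color_context (description : String) (colors : List String) : List (String × List String) :=
  let color_contexts : PySem.Dict String (List String) :=
    colors.foldl (fun d color =>
      let sentences := ((PySem.Str.split? (PySem.Str.lower description) ".").getD []).filter
        (fun s => PySem.Str.isIn color s)
      sentences.foldl (fun d sentence =>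
        let r := pvContexts.foldl (fun (acc : PySem.Dict String (List String) × Bool) cw =>
          if cw.2.any (fun word => PySem.Str.isIn word sentence) then
            (PySem.Dict.modify acc.1 color [] (fun l => l ++ [cw.1]), true)
          else acc) (d, false)
        if r.2 then r.1 else PySem.Dict.modify r.1 color [] (fun l => l ++ ["general"])) d)
      PySem.Dict.empty
  color_contexts.items

-- ===== PORT B =====
-- per-sentence label list: the matching context types, or ['general'] if none
def pvLabels (sentence : String) : List String :=
  let labels := (pvContexts.filter (fun cw => cw.2.any (fun w => PySem.Str.isIn w sentence))).map (fun cw => cw.1)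
  if labels.isEmpty then ["general"] else labels

-- result.setdefault(color, []).extend(labels) mutates the stored list in place: as a Dict value update it is Dict.modify color [] (· ++ labels)
def analyze_color_context_alt (description : String) (colors : List String) : List (String × List String) :=
  let table := ((PySem.Str.split? (PySem.Str.lower description) ".").getD []).map
    (fun sentence => (sentence, pvLabels sentence))
  let result : PySem.Dict String (List String) :=
    colors.foldl (fun d color =>
      table.foldl (fun d p =>
        if PySem.Str.isIn color p.1 then PySem.Dict.modify d color [] (fun l => l ++ p.2) else d) d)
      PySem.Dict.empty
  result.items

-- ===== PRECONDITION & SPEC =====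
def Spec_analyze_color_context (description : String) (colors : List String) (out : List (String × List String)) : Prop := out = analyze_color_context_alt description colors
instance (description : String) (colors : List String) (out : List (String × List String)) : Decidable (Spec_analyze_color_context description colors out) := by unfold Spec_analyze_color_context; infer_instance

-- ===== CLAIM (what is proved, stated in full; the proofs are below) =====
def Claim_equal_analyze_color_context : Prop := ∀ (description : String) (colors : List String), Dom_analyze_color_context description colors → Spec_analyze_color_context description colors (analyze_color_context description colors)

-- ===== LEMMAS AND PROOFS =====

theorem dict_ext {κ ν : Type} (a b : PySem.Dict κ ν) (h : a.items = b.items) : a = b := by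
  cases a; cases b; cases h; rfl

theorem insert_insert_self {κ ν : Type} [BEq κ] [LawfulBEq κ] (d : PySem.Dict κ ν) (k : κ) (v w : ν) :
    (d.insert k v).insert k w = d.insert k w := by
  have hc2 : (d.insert k v).contains k = true := by
    rw [PySem.Dict.contains_insert]; simp
  apply dict_ext
  rw [PySem.Dict.items_insert_of_contains (h := hc2)]
  cases h : d.contains k with
  | true =>
    rw [PySem.Dict.items_insert_of_contains (h := h), PySem.Dict.items_insert_of_contains (h := h)]
    rw [List.map_map]
    apply List.map_congr_left
    intro p _
    by_cases hpk : (p.1 == k) = true <;> simp [hpk]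
  | false =>
    rw [PySem.Dict.items_insert_of_not_contains (h := h), PySem.Dict.items_insert_of_not_contains (h := h)]
    have h' : (d.items.any fun p => p.1 == k) = false := by
      simpa [PySem.Dict.contains] using h
    have hall : ∀ p ∈ d.items, ¬ (p.1 == k) = true := by
      rw [List.any_eq_false] at h'
      exact h'
    rw [List.map_append]
    have hid : List.map (fun p => if (p.1 == k) = true then (k, w) else p) d.items
        = List.map (fun p => p) d.items := by
      apply List.map_congr_left
      intro p hp
      simp [hall p hp]
    rw [hid]
    simp

theorem modify_modify_self {κ ν : Type} [BEq κ] [LawfulBEq κ] (d : PySem.Dict κ ν) (k : κ) (d0 : ν) (f g : ν → ν) :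
    (d.modify k d0 f).modify k d0 g = d.modify k d0 (fun v => g (f v)) := by
  simp only [PySem.Dict.modify]
  rw [show (d.insert k (f (d.getD k d0))).getD k d0 = f (d.getD k d0) from by
        simp [PySem.Dict.getD_insert_self]]
  exact insert_insert_self d k _ _

-- a chain of single-append modifies starting from one modify is one modify appending the whole mapped list
theorem foldl_modify_append {α : Type} (k : String) (xs : List α) (f : α → String) :
    ∀ (d : PySem.Dict String (List String)) (g : List String → List String),
      xs.foldl (fun d x => d.modify k [] (fun l => l ++ [f x])) (d.modify k [] g)
        = d.modify k [] (fun l => g l ++ xs.map f) := by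
  induction xs with
  | nil => intro d g; simp
  | cons x t ih =>
    intro d g
    simp only [List.foldl_cons]
    rw [modify_modify_self, ih d (fun l => g l ++ [f x])]
    simp

-- a nonempty chain of per-context modifies is one modify appending all the context names
theorem foldl_modify_chain (color : String) (c : String × List String)
    (t : List (String × List String)) (d : PySem.Dict String (List String)) :
    (c :: t).foldl (fun d cw => PySem.Dict.modify d color [] (fun l => l ++ [cw.1])) d
      = PySem.Dict.modify d color [] (fun l => l ++ (c :: t).map (fun cw => cw.1)) := by
  simp only [List.foldl_cons]
  rw [show (PySem.Dict.modify d color [] fun l => l ++ [c.1])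
        = PySem.Dict.modify d color [] (fun l => (fun l => l ++ [c.1]) l) from rfl]
  rw [foldl_modify_append color t (fun cw => cw.1) d (fun l => l ++ [c.1])]
  simp

-- A's contexts loop with the found flag, over any context list and predicate, from any flag
theorem ctx_fold (color : String) (q : String × List String → Bool) :
    ∀ (cs : List (String × List String)) (d : PySem.Dict String (List String)) (b : Bool),
      cs.foldl (fun (acc : PySem.Dict String (List String) × Bool) cw =>
          if q cw then (PySem.Dict.modify acc.1 color [] (fun l => l ++ [cw.1]), true) else acc) (d, b)
      = ((cs.filter q).foldl (fun d cw => PySem.Dict.modify d color [] (fun l => l ++ [cw.1])) d,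
         b || cs.any q) := by
  intro cs
  induction cs with
  | nil => intro d b; simp
  | cons c t ih =>
    intro d b
    cases hq : q c with
    | true =>
      simp only [List.foldl_cons, List.filter_cons, List.any_cons, hq, if_true, ih]
      simp
    | false =>
      simp only [List.foldl_cons, List.filter_cons, List.any_cons, hq, ih]
      simp

-- A's whole per-sentence step equals one modify with the precomputed label list
theorem per_step (color : String) (q : String × List String → Bool)
    (cs : List (String × List String)) (d : PySem.Dict String (List String)) :
    (let r := cs.foldl (fun (acc : PySem.Dict String (List String) × Bool) cw =>
        if q cw then (PySem.Dict.modify acc.1 color [] (fun l => l ++ [cw.1]), true) else acc) (d, false)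
     if r.2 then r.1 else PySem.Dict.modify r.1 color [] (fun l => l ++ ["general"]))
    = PySem.Dict.modify d color []
        (fun l => l ++ (let labels := (cs.filter q).map (fun cw => cw.1);
                        if labels.isEmpty then ["general"] else labels)) := by
  rw [ctx_fold]
  simp only [Bool.false_or]
  cases h : cs.any q with
  | true =>
    rcases List.any_eq_true.mp h with ⟨c, hc, hcp⟩
    have hmem : c ∈ cs.filter q := List.mem_filter.mpr ⟨hc, hcp⟩
    have hne : cs.filter q ≠ [] := by
      intro hnil
      rw [hnil] at hmem
      exact absurd hmem (List.not_mem_nil)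
    obtain ⟨c0, t0, hct⟩ := List.exists_cons_of_ne_nil hne
    rw [hct, foldl_modify_chain]
    simp
  | false =>
    have hfil : cs.filter q = [] := by
      rw [List.filter_eq_nil_iff]
      intro c hc
      cases hcp : q c with
      | false => simp
      | true => exact absurd (List.any_eq_true.mpr ⟨c, hc, hcp⟩) (by simp [h])
    simp [hfil]

set_option maxHeartbeats 2000000 in
theorem analyze_eq (description : String) (colors : List String) :
    analyze_color_context description colors = analyze_color_context_alt description colors := by
  unfold analyze_color_context analyze_color_context_alt
  dsimp only
  refine congrArg PySem.Dict.items ?_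
  apply PySem.List.foldl_congr_mem
  intro d color _
  dsimp only
  rw [List.foldl_map]
  dsimp only
  rw [PySem.List.foldl_if_eq_foldl_filter
    (p := fun sentence => PySem.Str.isIn color sentence)
    (f := fun d sentence => PySem.Dict.modify d color [] (fun l => l ++ pvLabels sentence))]
  apply PySem.List.foldl_congr_mem
  intro d' sentence _
  exact per_step color (fun cw => cw.2.any (fun w => PySem.Str.isIn w sentence)) pvContexts d'

-- ===== VERDICT (by name: the statement is the Claim_ definition above) =====
theorem analyze_color_context_spec : Claim_equal_analyze_color_context := by
  intro description colors _
  unfold Spec_analyze_color_context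
  exact analyze_eq description colors
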